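-- pv_equiv track=rewrite | github.com/kbhatnagar1506/profitwisedashboard-up | app.py | generate_business_recommendations
-- ===== SOURCE A (Python) =====
-- def generate_business_recommendations(onboarding_data):
--     """Generate business recommendations based on onboarding data"""
--     recommendations = []
--
--     # Revenue diversification
--     if onboarding_data.get('revenue_type') == 'one-time':
--         recommendations.append({
--             'category': 'Revenue',
--             'title': 'Consider Recurring Revenue',
--             'description': 'Explore subscription models or recurring services to stabilize cash flow.'
--         })
--
--     # Social media presence
--     social_count = sum(1 for key in ['linkedin_page', 'twitter_handle', 'instagram_account', 'facebook_page']
--                       if onboarding_data.get(key))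
--     if social_count < 2:
--         recommendations.append({
--             'category': 'Marketing',
--             'title': 'Expand Social Media Presence',
--             'description': 'Increase your social media presence to reach more customers and build brand awareness.'
--         })
--
--     # Financial tracking
--     if not onboarding_data.get('financial_tools'):
--         recommendations.append({
--             'category': 'Operations',
--             'title': 'Implement Financial Tracking',
--             'description': 'Use proper financial software to track expenses, revenue, and profitability more accurately.'
--         })
--
--     # Growth opportunities
--     if onboarding_data.get('upsell_cross_sell') == 'no':
--         recommendations.append({
--             'category': 'Growth',
--             'title': 'Develop Upselling Strategy',
--             'description': 'Create additional revenue streams by upselling or cross-selling to existing customers.'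
--         })
--
--     return recommendations
-- ===== SOURCE B (Python) =====
-- def generate_business_recommendations(onboarding_data):
--     """Generate business recommendations based on onboarding data.
--
--     All 16 possible answers are precomputed once into _TABLE, indexed by a
--     4-bit mask of the conditions; each call computes the mask and returns a
--     copy of the precomputed answer (a single table lookup, no per-rule
--     check-and-append at call time)."""
--     g = onboarding_data.get
--     mask = (8 * (g('revenue_type') == 'one-time')
--             + 4 * (sum(1 for k in ['linkedin_page', 'twitter_handle',
--                                    'instagram_account', 'facebook_page'] if g(k)) < 2)
--             + 2 * (not g('financial_tools'))
--             + 1 * (g('upsell_cross_sell') == 'no'))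
--     return list(_TABLE[mask])
--
--
-- _RECS = [
--     {'category': 'Revenue',
--      'title': 'Consider Recurring Revenue',
--      'description': 'Explore subscription models or recurring services to stabilize cash flow.'},
--     {'category': 'Marketing',
--      'title': 'Expand Social Media Presence',
--      'description': 'Increase your social media presence to reach more customers and build brand awareness.'},
--     {'category': 'Operations',
--      'title': 'Implement Financial Tracking',
--      'description': 'Use proper financial software to track expenses, revenue, and profitability more accurately.'},
--     {'category': 'Growth',
--      'title': 'Develop Upselling Strategy',
--      'description': 'Create additional revenue streams by upselling or cross-selling to existing customers.'},
-- ]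
--
-- _TABLE = [[_RECS[i] for i in range(4) if (m // (2 ** (3 - i))) % 2 == 1]
--           for m in range(16)]
-- ===== Notes on version B (the rewrite author's own statement) =====
-- stated objective: alternative
-- what changed: All 16 possible outputs are precomputed once into a table indexed by a 4-bit condition mask; each call computes the mask from the four flags and returns the table entry with a single lookup, instead of A's four runtime check-and-append conditionals.
import Mathlib
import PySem

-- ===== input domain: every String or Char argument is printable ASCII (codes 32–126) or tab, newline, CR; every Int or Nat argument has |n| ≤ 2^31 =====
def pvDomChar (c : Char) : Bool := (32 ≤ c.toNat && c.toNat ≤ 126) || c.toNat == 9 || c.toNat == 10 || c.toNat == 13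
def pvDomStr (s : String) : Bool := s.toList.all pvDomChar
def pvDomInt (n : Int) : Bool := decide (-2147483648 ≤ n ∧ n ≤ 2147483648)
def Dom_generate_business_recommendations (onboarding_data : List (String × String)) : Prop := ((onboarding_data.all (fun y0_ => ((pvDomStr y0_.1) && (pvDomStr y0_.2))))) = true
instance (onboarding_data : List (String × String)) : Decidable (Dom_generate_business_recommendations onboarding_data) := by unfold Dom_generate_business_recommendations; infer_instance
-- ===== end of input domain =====

-- B replaces A's four runtime check-and-append conditionals with a 16-entry table of
-- precomputed answers indexed by a 4-bit condition mask; objective: alternative.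

-- dict.get(key) on the association list: first match, none if absent (exact for Python dict lookup)
def pvGet (d : List (String × String)) (k : String) : Option String := List.lookup k d

-- Python truthiness of an optional string: present and non-empty
def pvTruthy (o : Option String) : Bool :=
  match o with
  | some s => !s.isEmpty
  | none => false

-- ===== PORT A =====
def generate_business_recommendations (onboarding_data : List (String × String)) : List (List (String × String)) :=
  let recommendations : List (List (String × String)) := []
  let recommendations :=
    if pvGet onboarding_data "revenue_type" == some "one-time" then
      recommendations ++ [[("category", "Revenue"), ("title", "Consider Recurring Revenue"),
        ("description", "Explore subscription models or recurring services to stabilize cash flow.")]]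
    else recommendations
  let social_count : Int :=
    (["linkedin_page", "twitter_handle", "instagram_account", "facebook_page"].foldl
      (fun acc key => if pvTruthy (pvGet onboarding_data key) then acc + 1 else acc) 0)
  let recommendations :=
    if social_count < 2 then
      recommendations ++ [[("category", "Marketing"), ("title", "Expand Social Media Presence"),
        ("description", "Increase your social media presence to reach more customers and build brand awareness.")]]
    else recommendations
  let recommendations :=
    if !pvTruthy (pvGet onboarding_data "financial_tools") then
      recommendations ++ [[("category", "Operations"), ("title", "Implement Financial Tracking"),
        ("description", "Use proper financial software to track expenses, revenue, and profitability more accurately.")]]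
    else recommendations
  let recommendations :=
    if pvGet onboarding_data "upsell_cross_sell" == some "no" then
      recommendations ++ [[("category", "Growth"), ("title", "Develop Upselling Strategy"),
        ("description", "Create additional revenue streams by upselling or cross-selling to existing customers.")]]
    else recommendations
  recommendations

-- ===== PORT B =====
-- _RECS: the four recommendation dicts
def pvRecsB : List (List (String × String)) :=
  [ [("category", "Revenue"), ("title", "Consider Recurring Revenue"),
     ("description", "Explore subscription models or recurring services to stabilize cash flow.")],
    [("category", "Marketing"), ("title", "Expand Social Media Presence"),
     ("description", "Increase your social media presence to reach more customers and build brand awareness.")],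
    [("category", "Operations"), ("title", "Implement Financial Tracking"),
     ("description", "Use proper financial software to track expenses, revenue, and profitability more accurately.")],
    [("category", "Growth"), ("title", "Develop Upselling Strategy"),
     ("description", "Create additional revenue streams by upselling or cross-selling to existing customers.")] ]

-- _TABLE: for each mask m in range(16), [_RECS[i] for i in range(4) if (m // 2**(3-i)) % 2 == 1].
-- The exponent 3 - i is in [0,3] for i in range(4), so .toNat is exact; _RECS[i] is always in
-- range for i in range(4), so the .getD [] default never fires.
def pvTableB : List (List (List (String × String))) :=
  (PySem.List.pyRange 0 16 1).map (fun m =>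
    ((PySem.List.pyRange 0 4 1).filter
        (fun i => PySem.Int.mod (PySem.Int.floordiv m ((2 : Int) ^ (3 - i).toNat)) 2 == 1)).map
      (fun i => (PySem.List.pyGet? pvRecsB i).getD []))

def generate_business_recommendations_alt (onboarding_data : List (String × String)) : List (List (String × String)) :=
  let mask : Int :=
    (if pvGet onboarding_data "revenue_type" == some "one-time" then 8 else 0)
    + (if (["linkedin_page", "twitter_handle", "instagram_account", "facebook_page"].foldl
          (fun acc key => if pvTruthy (pvGet onboarding_data key) then acc + 1 else acc) (0 : Int)) < 2
       then 4 else 0)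
    + (if !pvTruthy (pvGet onboarding_data "financial_tools") then 2 else 0)
    + (if pvGet onboarding_data "upsell_cross_sell" == some "no" then 1 else 0)
  -- mask ∈ [0,16), so the table lookup is always in range and the .getD [] default never fires
  (PySem.List.pyGet? pvTableB mask).getD []

-- ===== PRECONDITION & SPEC =====
def Spec_generate_business_recommendations (onboarding_data : List (String × String)) (out : List (List (String × String))) : Prop := out = generate_business_recommendations_alt onboarding_data
instance (onboarding_data : List (String × String)) (out : List (List (String × String))) : Decidable (Spec_generate_business_recommendations onboarding_data out) := by unfold Spec_generate_business_recommendations; infer_instance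

-- ===== CLAIM =====
def Claim_equal_generate_business_recommendations : Prop := ∀ (onboarding_data : List (String × String)), Dom_generate_business_recommendations onboarding_data → Spec_generate_business_recommendations onboarding_data (generate_business_recommendations onboarding_data)

-- ===== LEMMAS AND PROOFS =====

-- ===== VERDICT =====
theorem generate_business_recommendations_spec : Claim_equal_generate_business_recommendations := by
  intro d _
  show generate_business_recommendations d = generate_business_recommendations_alt d
  unfold generate_business_recommendations generate_business_recommendations_alt
  by_cases h1 : (pvGet d "revenue_type" == some "one-time") = true <;>
  by_cases h2 : (List.foldl (fun acc key => if pvTruthy (pvGet d key) = true then acc + 1 else acc)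
      (0 : Int) ["linkedin_page", "twitter_handle", "instagram_account", "facebook_page"]) < 2 <;>
  by_cases h3 : (!pvTruthy (pvGet d "financial_tools")) = true <;>
  by_cases h4 : (pvGet d "upsell_cross_sell" == some "no") = true <;>
    simp only [h1, h2, h3, h4, if_pos, if_neg, not_false_iff] <;> rfl
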